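-- pv_equiv track=rewrite | github.com/abiyeenzo/vacances-code-challenge | mission4/mission4.py | compter_mots_uniques
-- ===== SOURCE A (Python) =====
-- import string
--
-- def compter_mots_uniques(texte):
--     # Nettoyer la ponctuation
--     texte_nettoye = texte.lower()
--     for ponct in string.punctuation:
--         texte_nettoye = texte_nettoye.replace(ponct, "")
--     mots = texte_nettoye.split()
--
--     total_mots = len(mots)
--     mots_uniques = set(mots)
--     return total_mots, mots_uniques
-- ===== SOURCE B (Python) =====
-- import string
--
-- def compter_mots_uniques(texte):
--     # One pass over the characters: lowercase each char; punctuation is dropped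
--     # without ending the current word (matching the delete-then-join behaviour);
--     # whitespace flushes the buffer; anything else extends it.
--     mots = []
--     buf = []
--     for ch in texte:
--         ch = ch.lower()
--         if ch in string.punctuation:
--             continue
--         if ch.isspace():
--             if buf:
--                 mots.append("".join(buf))
--                 buf = []
--         else:
--             buf.append(ch)
--     if buf:
--         mots.append("".join(buf))
--     return len(mots), set(mots)
-- ===== Notes on version B (the rewrite author's own statement) =====
-- stated objective: faster
-- what changed: Replaces the 32 full-text replace() passes plus a split() pass with one single scan over the characters that filters punctuation, lowercases and splits into words in the same pass.
import Mathlib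
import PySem

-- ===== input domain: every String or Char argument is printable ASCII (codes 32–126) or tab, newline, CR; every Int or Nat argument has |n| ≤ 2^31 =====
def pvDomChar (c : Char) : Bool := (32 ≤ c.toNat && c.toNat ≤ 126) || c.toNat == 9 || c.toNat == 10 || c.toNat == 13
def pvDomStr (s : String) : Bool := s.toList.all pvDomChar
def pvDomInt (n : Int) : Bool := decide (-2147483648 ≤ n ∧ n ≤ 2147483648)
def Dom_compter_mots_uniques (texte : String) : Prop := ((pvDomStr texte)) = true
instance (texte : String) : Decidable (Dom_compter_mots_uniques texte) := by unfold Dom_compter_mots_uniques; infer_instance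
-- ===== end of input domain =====

-- B replaces A's 32 whole-text replace() passes + split() by one single character scan (objective: faster, constant factor).

-- string.punctuation
def pvPunct : List Char := "!\"#$%&'()*+,-./:;<=>?@[\\]^_`{|}~".toList

-- ===== PORT A =====
def compter_mots_uniques (texte : String) : Int × List String :=
  let texte_nettoye := pvPunct.foldl (fun s ponct => PySem.Chars.replace s [ponct] []) (PySem.Chars.lower texte.toList)
  let mots := (PySem.Chars.split₀ texte_nettoye).map String.mk
  ((mots.length : Int), PySem.Set.ofList mots)

-- ===== PORT B =====
-- one pass: lowercase each char, skip punctuation, whitespace flushes the buffer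
def pvScanB : List Char → List Char → List (List Char) → List (List Char)
  | [], buf, mots => if buf.isEmpty then mots else mots ++ [buf]
  | c :: rest, buf, mots =>
    let ch := PySem.Chars.lowerChar c
    if pvPunct.contains ch then pvScanB rest buf mots
    else if PySem.Chars.isspace ch then
      (if buf.isEmpty then pvScanB rest [] mots else pvScanB rest [] (mots ++ [buf]))
    else pvScanB rest (buf ++ [ch]) mots

def compter_mots_uniques_alt (texte : String) : Int × List String :=
  let mots := (pvScanB texte.toList [] []).map String.mk
  ((mots.length : Int), PySem.Set.ofList mots)

-- ===== PRECONDITION & SPEC =====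
def Spec_compter_mots_uniques (texte : String) (out : Int × List String) : Prop := out = compter_mots_uniques_alt texte
instance (texte : String) (out : Int × List String) : Decidable (Spec_compter_mots_uniques texte out) := by unfold Spec_compter_mots_uniques; infer_instance

-- ===== CLAIM (what is proved, stated in full; the proofs are below) =====
def Claim_equal_compter_mots_uniques : Prop := ∀ (texte : String), Dom_compter_mots_uniques texte → Spec_compter_mots_uniques texte (compter_mots_uniques texte)

-- ===== LEMMAS AND PROOFS =====

-- replacing one single-char string by "" is filtering that char out
theorem pv_replace_go_filter (p : Char) (l acc : List Char) (fuel : Nat) (h : l.length ≤ fuel) :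
    PySem.Chars.replace.go [p] [] fuel l acc = acc.reverse ++ l.filter (fun c => !(c == p)) := by
  induction l generalizing fuel acc with
  | nil => cases fuel <;> simp [PySem.Chars.replace.go]
  | cons c t ih =>
    cases fuel with
    | zero => simp at h
    | succ f =>
      have h' : t.length ≤ f := by simp at h; omega
      simp only [PySem.Chars.replace.go, List.isPrefixOf, Bool.and_true]
      by_cases hc : c = p
      · have hpc : (p == c) = true := by simp [hc]
        rw [if_pos hpc]
        have hd : List.drop [p].length (c :: t) = t := rfl
        have hf : List.filter (fun x => !(x == p)) (c :: t) = List.filter (fun x => !(x == p)) t := by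
          rw [List.filter_cons]; simp [hc]
        rw [hd, ih _ _ h', hf]
        simp
      · have hpc : (p == c) = false := beq_eq_false_iff_ne.mpr (Ne.symm hc)
        simp only [hpc, Bool.false_eq_true, if_false]
        rw [ih _ _ h']
        simp [hc]

theorem pv_replace_filter (s : List Char) (p : Char) :
    PySem.Chars.replace s [p] [] = s.filter (fun c => !(c == p)) := by
  have := pv_replace_go_filter p s [] s.length le_rfl
  simpa [PySem.Chars.replace] using this

-- folding single-char deletions over ps removes every char of ps
theorem pv_foldl_replace (ps : List Char) (s : List Char) :
    ps.foldl (fun s p => PySem.Chars.replace s [p] []) s = s.filter (fun c => !(ps.contains c)) := by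
  induction ps generalizing s with
  | nil => simp
  | cons p ps ih =>
    rw [List.foldl_cons, pv_replace_filter, ih, List.filter_filter]
    refine List.filter_congr (fun c _ => ?_)
    cases hcp : c == p <;> cases hps : ps.contains c <;> simp_all

-- proof-only splitter on the already cleaned stream, same state as pvScanB
def pvSScan : List Char → List Char → List (List Char) → List (List Char)
  | [], buf, mots => if buf.isEmpty then mots else mots ++ [buf]
  | c :: rest, buf, mots =>
    if PySem.Chars.isspace c then
      (if buf.isEmpty then pvSScan rest [] mots else pvSScan rest [] (mots ++ [buf]))
    else pvSScan rest (buf ++ [c]) mots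

theorem pv_bScan_eq_sScan (t : List Char) (buf : List Char) (mots : List (List Char)) :
    pvScanB t buf mots
      = pvSScan ((t.map PySem.Chars.lowerChar).filter (fun c => !(pvPunct.contains c))) buf mots := by
  induction t generalizing buf mots with
  | nil => rfl
  | cons c rest ih =>
    cases hp : pvPunct.contains (PySem.Chars.lowerChar c) with
    | true =>
      simp only [pvScanB, List.map_cons, List.filter_cons, hp, Bool.not_true, Bool.false_eq_true,
        if_false, if_true]
      exact ih buf mots
    | false =>
      simp only [pvScanB, List.map_cons, List.filter_cons, hp, Bool.not_false, Bool.false_eq_true,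
        if_false, if_true, pvSScan]
      cases hs : PySem.Chars.isspace (PySem.Chars.lowerChar c) with
      | true => simp only [if_true]; by_cases hb : buf.isEmpty <;> simp [hb, ih]
      | false => simp only [Bool.false_eq_true, if_false]; exact ih _ _

theorem pv_sScan_eq_go (s : List Char) (buf : List Char) (mots : List (List Char)) :
    pvSScan s buf mots = PySem.Chars.split₀.go s buf.reverse mots.reverse := by
  induction s generalizing buf mots with
  | nil =>
    simp only [pvSScan, PySem.Chars.split₀.go]
    by_cases hb : buf.isEmpty <;> simp [hb]
  | cons c rest ih =>
    simp only [pvSScan, PySem.Chars.split₀.go]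
    by_cases hs : PySem.Chars.isspace c
    · by_cases hb : buf.isEmpty
      · simpa [hs, hb] using ih [] mots
      · have := ih [] (mots ++ [buf])
        simpa [hs, hb] using this
    · have := ih (buf ++ [c]) mots
      simpa [hs] using this

theorem pv_scan_eq_split₀ (t : List Char) :
    pvScanB t [] [] = PySem.Chars.split₀ ((t.map PySem.Chars.lowerChar).filter (fun c => !(pvPunct.contains c))) := by
  rw [pv_bScan_eq_sScan, pv_sScan_eq_go]
  rfl

-- ===== VERDICT (by name: the statement is the Claim_ definition above) =====
theorem compter_mots_uniques_spec : Claim_equal_compter_mots_uniques := by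
  intro texte _
  unfold Spec_compter_mots_uniques compter_mots_uniques compter_mots_uniques_alt
  rw [pv_scan_eq_split₀, pv_foldl_replace]
  rfl
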